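-- pv_equiv track=rewrite | github.com/FatemRahimi/codewars-python | diffrence.py | twos_difference
-- ===== SOURCE A (Python) =====
-- def twos_difference(arr):
--     arr = sorted(arr)
--     b = []
--     for i in range(len(arr)):
--         for j in range(len(arr)):
--             if arr[j] - arr[i] == 2:
--                 b.append((arr[i],arr[j]))
--     return b
-- ===== SOURCE B (Python) =====
-- def twos_difference(arr):
--     s = sorted(arr)
--     cnt = {}
--     for x in s:
--         cnt[x] = cnt.get(x, 0) + 1
--     out = []
--     for x in s:
--         out += [(x, x + 2)] * cnt.get(x + 2, 0)
--     return out
-- ===== Notes on version B (the rewrite author's own statement) =====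
-- stated objective: faster
-- what changed: Replaces the O(n^2) nested index scan with a single count dictionary built over the sorted list, emitting each pair (x, x+2) repeated count[x+2] times in one pass.
import Mathlib
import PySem

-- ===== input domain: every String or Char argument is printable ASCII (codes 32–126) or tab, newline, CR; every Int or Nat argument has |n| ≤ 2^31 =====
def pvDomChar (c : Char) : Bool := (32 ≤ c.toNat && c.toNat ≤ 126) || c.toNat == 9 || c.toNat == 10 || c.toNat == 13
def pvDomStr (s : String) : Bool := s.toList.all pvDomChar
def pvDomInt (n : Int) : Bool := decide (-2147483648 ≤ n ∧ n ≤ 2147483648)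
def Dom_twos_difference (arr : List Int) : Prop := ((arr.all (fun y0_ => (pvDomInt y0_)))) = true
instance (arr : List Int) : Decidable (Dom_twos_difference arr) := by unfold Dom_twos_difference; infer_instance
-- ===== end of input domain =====

-- B replaces A's O(n^2) nested index scan with a count dictionary over the sorted list (faster).

-- ===== PORT A =====
def twos_difference (arr : List Int) : List (Int × Int) :=
  let s := PySem.List.sorted arr (fun x => x) false
  (PySem.List.pyRange 0 (PySem.List.len s) 1).foldl (fun b i =>
    (PySem.List.pyRange 0 (PySem.List.len s) 1).foldl (fun b j =>
      if PySem.List.pyGetD s j 0 - PySem.List.pyGetD s i 0 == 2 then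
        b ++ [(PySem.List.pyGetD s i 0, PySem.List.pyGetD s j 0)]
      else b) b) []

-- ===== PORT B =====
def twos_difference_alt (arr : List Int) : List (Int × Int) :=
  let s := PySem.List.sorted arr (fun x => x) false
  let cnt := s.foldl (fun d x => d.modify x 0 (· + 1)) (PySem.Dict.empty : PySem.Dict Int Int)
  s.foldl (fun out x => out ++ PySem.List.pyRepeat [(x, x + 2)] (cnt.getD (x + 2) 0)) []

-- ===== PRECONDITION & SPEC =====
def Spec_twos_difference (arr : List Int) (out : List (Int × Int)) : Prop := out = twos_difference_alt arr
instance (arr : List Int) (out : List (Int × Int)) : Decidable (Spec_twos_difference arr out) := by unfold Spec_twos_difference; infer_instance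

-- ===== CLAIM (what is proved, stated in full; the proofs are below) =====
def Claim_equal_twos_difference : Prop := ∀ (arr : List Int), Dom_twos_difference arr → Spec_twos_difference arr (twos_difference arr)

-- ===== LEMMAS AND PROOFS =====

-- per-element: the inner scan of A over s collects exactly (s.count (x+2)) copies of (x, x+2)
lemma inner_eq_replicate (s : List Int) (x : Int) :
    (s.filter (fun y => y - x == 2)).map (fun y => (x, y)) =
      List.replicate (s.count (x + 2)) (x, x + 2) := by
  have hf : s.filter (fun y => y - x == 2) = s.filter (· == x + 2) := by
    apply List.filter_congr
    intro y _
    by_cases h : y = x + 2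
    · subst h; simp
    · have h2 : ¬ (y - x = 2) := by omega
      simp [h, h2]
  rw [hf, List.filter_beq, List.map_replicate]

theorem twos_difference_eq (arr : List Int) :
    twos_difference arr = twos_difference_alt arr := by
  unfold twos_difference twos_difference_alt
  set s := PySem.List.sorted arr (fun x => x) false with hs
  -- turn A's index loops into element loops
  rw [PySem.List.foldl_pyRange_zero_pyGetD s 0
    (fun b x => (PySem.List.pyRange 0 (PySem.List.len s) 1).foldl (fun b j =>
      if PySem.List.pyGetD s j 0 - x == 2 then b ++ [(x, PySem.List.pyGetD s j 0)] else b) b) []]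
  have houter : ∀ (init : List (Int × Int)),
      s.foldl (fun b x => (PySem.List.pyRange 0 (PySem.List.len s) 1).foldl (fun b j =>
        if PySem.List.pyGetD s j 0 - x == 2 then b ++ [(x, PySem.List.pyGetD s j 0)] else b) b) init
      = s.foldl (fun b x => b ++ List.replicate (s.count (x + 2)) (x, x + 2)) init := by
    intro init
    apply PySem.List.foldl_congr_mem
    intro b x _
    rw [PySem.List.foldl_pyRange_zero_pyGetD s 0
      (fun b y => if y - x == 2 then b ++ [(x, y)] else b) b]
    rw [PySem.List.foldl_append_if (fun y => y - x == 2) (fun y => (x, y))]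
    rw [inner_eq_replicate]
  rw [houter]
  apply PySem.List.foldl_congr_mem
  intro b x _
  congr 1
  rw [PySem.List.pyRepeat_singleton]
  congr 1
  rw [PySem.Dict.getD_foldl_modify_add_one]
  simp [PySem.Dict.getD, PySem.Dict.get?, PySem.Dict.empty]

-- ===== VERDICT (by name: the statement is the Claim_ definition above) =====
theorem twos_difference_spec : Claim_equal_twos_difference := by
  intro arr _
  exact twos_difference_eq arr
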